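-- pv_equiv track=rewrite | github.com/Eyresai2025/Apollo_Vit_App | src/COMMON/cycle_engine.py | combine_tire_decision
-- ===== SOURCE A (Python) =====
-- from typing import Any, Dict, List, Optional
--
-- def combine_tire_decision(side_results: Dict[str, Dict[str, Any]]) -> str:
--     labels = [x.get("final_label", "") for x in side_results.values()]
--
--     if any(x == "DEFECT" for x in labels):
--         return "DEFECT"
--
--     if any(x == "SUSPECT" for x in labels):
--         return "SUSPECT"
--
--     if any(x in ["INVALID", "FAILED"] for x in labels):
--         return "INVALID"
--
--     return "OK"
-- ===== SOURCE B (Python) =====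
-- _PRIORITY = {"DEFECT": 3, "SUSPECT": 2, "INVALID": 1, "FAILED": 1}
-- _NAME = {3: "DEFECT", 2: "SUSPECT", 1: "INVALID", 0: "OK"}
--
-- def combine_tire_decision(side_results):
--     worst = 0
--     for entry in side_results.values():
--         worst = max(worst, _PRIORITY.get(entry.get("final_label", ""), 0))
--     return _NAME[worst]
-- ===== Notes on version B (the rewrite author's own statement) =====
-- stated objective: simpler
-- what changed: Replaced A's three ordered any() scans over the label list with a single pass computing the maximum of a priority-rank table, mapped back to a label through a reverse table.
import Mathlib
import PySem

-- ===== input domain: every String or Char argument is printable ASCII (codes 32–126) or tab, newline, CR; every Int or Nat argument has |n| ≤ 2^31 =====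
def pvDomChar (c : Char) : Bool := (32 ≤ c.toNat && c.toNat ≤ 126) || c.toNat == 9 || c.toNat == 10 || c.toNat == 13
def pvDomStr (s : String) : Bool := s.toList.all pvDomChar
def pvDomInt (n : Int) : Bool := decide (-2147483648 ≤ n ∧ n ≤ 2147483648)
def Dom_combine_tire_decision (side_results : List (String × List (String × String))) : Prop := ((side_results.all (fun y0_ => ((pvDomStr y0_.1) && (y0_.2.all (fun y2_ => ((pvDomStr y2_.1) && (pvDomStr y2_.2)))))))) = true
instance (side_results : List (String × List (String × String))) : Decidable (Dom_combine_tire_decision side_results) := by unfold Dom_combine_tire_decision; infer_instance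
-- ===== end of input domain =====

-- B replaces A's three ordered any() scans with one pass taking a max over a priority table (objective: simpler).

-- ===== PORT A =====
def combine_tire_decision (side_results : List (String × List (String × String))) : String :=
  let labels := side_results.map (fun x => (PySem.Dict.mk x.2).getD "final_label" "")
  if labels.any (fun x => x == "DEFECT") then "DEFECT"
  else if labels.any (fun x => x == "SUSPECT") then "SUSPECT"
  else if labels.any (fun x => ["INVALID", "FAILED"].contains x) then "INVALID"
  else "OK"

-- ===== PORT B =====
def pvPriority : PySem.Dict String Int :=
  PySem.Dict.mk [("DEFECT", 3), ("SUSPECT", 2), ("INVALID", 1), ("FAILED", 1)]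

def pvName : PySem.Dict Int String :=
  PySem.Dict.mk [(3, "DEFECT"), (2, "SUSPECT"), (1, "INVALID"), (0, "OK")]

def combine_tire_decision_alt (side_results : List (String × List (String × String))) : String :=
  let worst := side_results.foldl
    (fun w x => max w (pvPriority.getD ((PySem.Dict.mk x.2).getD "final_label" "") 0)) 0
  (pvName.get? worst).getD ""   -- _NAME[worst]; worst ∈ {0,1,2,3} always, so the lookup never misses

-- ===== PRECONDITION & SPEC =====
def Spec_combine_tire_decision (side_results : List (String × List (String × String))) (out : String) : Prop := out = combine_tire_decision_alt side_results
instance (side_results : List (String × List (String × String))) (out : String) : Decidable (Spec_combine_tire_decision side_results out) := by unfold Spec_combine_tire_decision; infer_instance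

-- ===== CLAIM (what is proved, stated in full; the proofs are below) =====
def Claim_equal_combine_tire_decision : Prop := ∀ (side_results : List (String × List (String × String))), Dom_combine_tire_decision side_results → Spec_combine_tire_decision side_results (combine_tire_decision side_results)

-- ===== LEMMAS AND PROOFS =====

-- A's three-scan verdict expressed as an integer rank over the label list
def pvRankA (ls : List String) : Int :=
  if ls.any (fun x => x == "DEFECT") then 3
  else if ls.any (fun x => x == "SUSPECT") then 2
  else if ls.any (fun x => ["INVALID", "FAILED"].contains x) then 1
  else 0

lemma pvRankA_nonneg (ls : List String) : 0 ≤ pvRankA ls := by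
  unfold pvRankA; split_ifs <;> omega

-- B's priority table as the corresponding if-chain
lemma pvPriority_getD (s : String) :
    pvPriority.getD s 0 =
      if s = "DEFECT" then 3 else if s = "SUSPECT" then 2
      else if s = "INVALID" ∨ s = "FAILED" then 1 else 0 := by
  by_cases h1 : s = "DEFECT"
  · subst h1; decide
  by_cases h2 : s = "SUSPECT"
  · subst h2; decide
  by_cases h3 : s = "INVALID"
  · subst h3; decide
  by_cases h4 : s = "FAILED"
  · subst h4; decide
  have e1 : ("DEFECT" == s) = false := beq_eq_false_iff_ne.mpr (fun h => h1 h.symm)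
  have e2 : ("SUSPECT" == s) = false := beq_eq_false_iff_ne.mpr (fun h => h2 h.symm)
  have e3 : ("INVALID" == s) = false := beq_eq_false_iff_ne.mpr (fun h => h3 h.symm)
  have e4 : ("FAILED" == s) = false := beq_eq_false_iff_ne.mpr (fun h => h4 h.symm)
  simp only [pvPriority, PySem.Dict.getD_eq_get?_getD, PySem.Dict.get?_mk_cons, e1, e2, e3, e4,
    Bool.false_eq_true, if_false]
  rw [show (PySem.Dict.mk ([] : List (String × Int))).get? s = none from rfl]
  simp [h1, h2, h3, h4]

lemma pvRankA_cons (x : String) (ls : List String) :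
    pvRankA (x :: ls) =
      max (if x = "DEFECT" then 3 else if x = "SUSPECT" then 2
           else if x = "INVALID" ∨ x = "FAILED" then 1 else 0) (pvRankA ls) := by
  simp only [pvRankA, List.any_cons, List.contains_cons, beq_iff_eq, List.contains_nil,
    Bool.or_eq_true, Bool.or_false, decide_eq_true_eq]
  split_ifs <;> simp_all [max_def]

-- B's fold computes the maximum of w and A's rank of the label list
lemma pvFold_eq (ls : List String) (w : Int) (hw : 0 ≤ w) :
    ls.foldl (fun w x => max w (pvPriority.getD x 0)) w = max w (pvRankA ls) := by
  induction ls generalizing w with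
  | nil => simpa [pvRankA] using hw
  | cons x ls ih =>
      simp only [List.foldl_cons]
      rw [ih _ (le_max_of_le_left hw), pvPriority_getD, max_assoc, pvRankA_cons]

-- ===== VERDICT (by name: the statement is the Claim_ definition above) =====
theorem combine_tire_decision_spec : Claim_equal_combine_tire_decision := by
  intro sr _
  unfold Spec_combine_tire_decision combine_tire_decision combine_tire_decision_alt
  simp only []
  rw [show (List.foldl
        (fun w x => max w (pvPriority.getD ((PySem.Dict.mk x.2).getD "final_label" "") 0)) 0 sr)
      = ((sr.map (fun x => (PySem.Dict.mk x.2).getD "final_label" "")).foldl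
        (fun w s => max w (pvPriority.getD s 0)) 0) from (List.foldl_map (f := fun x : String × List (String × String) => (PySem.Dict.mk x.2).getD "final_label" "") (g := fun w s => max w (pvPriority.getD s 0)) (l := sr) (init := (0:Int))).symm]
  rw [pvFold_eq _ _ le_rfl, max_eq_right (pvRankA_nonneg _)]
  set ls := sr.map (fun x => (PySem.Dict.mk x.2).getD "final_label" "") with hls
  simp only [pvRankA]
  split_ifs <;> rfl
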